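-- pv_equiv track=rewrite | github.com/xusky69/mp3.ai-API | django_project/mp3/api/common.py | get_word_freq
-- ===== SOURCE A (Python) =====
-- def get_word_freq(word_list: list, sentence: str) -> dict:
--
--     word_freq = {}
--
--     for word in sentence.strip().split(' '):
--         if word not in word_freq.keys() and word in word_list:
--             word_freq[word] = 1
--         elif word in word_list:
--             word_freq[word] += 1
--         else:
--             pass
--
--     return word_freq
-- ===== SOURCE B (Python) =====
-- def get_word_freq(word_list: list, sentence: str) -> dict:
--     # Collect the allowed words in first-appearance order, then count each by scanning.
--     words = sentence.strip().split(' ')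
--     order = []
--     for w in words:
--         if w in word_list and w not in order:
--             order.append(w)
--     return {w: words.count(w) for w in order}
-- ===== Notes on version B (the rewrite author's own statement) =====
-- stated objective: alternative
-- what changed: A's single dict-accumulating loop (membership-gated insert/increment) is replaced by a dict-free algorithm: first collect the distinct allowed words in first-appearance order, then build the result with one list.count scan per distinct word.
import Mathlib
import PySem

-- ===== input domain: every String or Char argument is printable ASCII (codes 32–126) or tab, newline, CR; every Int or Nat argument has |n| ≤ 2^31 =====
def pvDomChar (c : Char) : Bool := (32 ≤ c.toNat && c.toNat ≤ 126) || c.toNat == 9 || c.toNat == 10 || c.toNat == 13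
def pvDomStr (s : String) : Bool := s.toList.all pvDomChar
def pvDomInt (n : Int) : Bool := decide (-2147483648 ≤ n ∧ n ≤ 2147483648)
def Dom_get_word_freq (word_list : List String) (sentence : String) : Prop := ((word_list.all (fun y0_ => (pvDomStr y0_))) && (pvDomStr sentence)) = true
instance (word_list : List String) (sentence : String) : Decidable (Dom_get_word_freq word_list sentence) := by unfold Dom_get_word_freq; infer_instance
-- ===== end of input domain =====

-- B drops A's dict accumulator: it first collects the distinct allowed words in
-- first-appearance order, then counts each one by a separate scan (objective: alternative).


-- ===== PORT A =====
def get_word_freq (word_list : List String) (sentence : String) : List (String × Int) :=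
  (((PySem.Str.split? (PySem.Str.strip sentence) " ").getD []).foldl
    (fun d w =>
      if ¬ d.contains w = true ∧ w ∈ word_list then d.insert w 1
      else if w ∈ word_list then d.modify w 0 (· + 1)
      else d)
    (PySem.Dict.empty : PySem.Dict String Int)).items

-- ===== PORT B =====
def get_word_freq_alt (word_list : List String) (sentence : String) : List (String × Int) :=
  let words := (PySem.Str.split? (PySem.Str.strip sentence) " ").getD []
  let order := words.foldl
    (fun acc w => if w ∈ word_list ∧ w ∉ acc then acc ++ [w] else acc) ([] : List String)
  order.map (fun w => (w, (PySem.List.count words w : Int)))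

-- ===== PRECONDITION & SPEC =====
def Spec_get_word_freq (word_list : List String) (sentence : String) (out : List (String × Int)) : Prop := out = get_word_freq_alt word_list sentence
instance (word_list : List String) (sentence : String) (out : List (String × Int)) : Decidable (Spec_get_word_freq word_list sentence out) := by unfold Spec_get_word_freq; infer_instance

-- ===== CLAIM =====
def Claim_equal_get_word_freq : Prop := ∀ (word_list : List String) (sentence : String), Dom_get_word_freq word_list sentence → Spec_get_word_freq word_list sentence (get_word_freq word_list sentence)

-- ===== LEMMAS AND PROOFS =====

-- A's loop body and B's first-pass body, named for the proofs
def pvA (wl : List String) (d : PySem.Dict String Int) (w : String) : PySem.Dict String Int :=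
  if ¬ d.contains w = true ∧ w ∈ wl then d.insert w 1
  else if w ∈ wl then d.modify w 0 (· + 1)
  else d

def pvS (wl : List String) (acc : List String) (w : String) : List String :=
  if w ∈ wl ∧ w ∉ acc then acc ++ [w] else acc

theorem pvMem_seen (wl : List String) (ws : List String) :
    ∀ (acc : List String) (u : String),
      u ∈ ws.foldl (pvS wl) acc ↔ u ∈ acc ∨ (u ∈ wl ∧ u ∈ ws) := by
  induction ws with
  | nil => intro acc u; simp
  | cons w ws ih =>
      intro acc u
      simp only [List.foldl_cons, ih, pvS, List.mem_cons]
      split_ifs with h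
      · by_cases hu : u = w
        · subst hu
          simp only [List.mem_append, List.mem_singleton]
          tauto
        · simp only [List.mem_append, List.mem_singleton, hu, or_false]
          tauto
      · by_cases hu : u = w
        · subst hu
          push Not at h
          tauto
        · tauto

theorem pvAny_map_key (l : List String) (f : String → Int) (w : String) :
    (l.map (fun u => (u, f u))).any (fun p => p.1 == w) = decide (w ∈ l) := by
  induction l with
  | nil => rfl
  | cons u l ih =>
      by_cases h : u = w
      · subst h; simp
      · simp [h, ih, Ne.symm h]

theorem pvFind_self (l : List String) (w : String) (h : w ∈ l) :
    l.find? (fun u => u == w) = some w := by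
  induction l with
  | nil => cases h
  | cons u l ih =>
      by_cases hu : u = w
      · subst hu; simp
      · have : w ∈ l := by cases h with
          | head => exact absurd rfl hu
          | tail _ h => exact h
        simp [hu, ih this]

theorem pvMain (wl : List String) (ws : List String) :
    (ws.foldl (pvA wl) (PySem.Dict.empty : PySem.Dict String Int)).items
      = (ws.foldl (pvS wl) []).map (fun u => (u, (ws.count u : Int))) := by
  induction ws using List.reverseRecOn with
  | nil => rfl
  | append_singleton ws w ih =>
      rw [List.foldl_append, List.foldl_append]
      simp only [List.foldl_cons, List.foldl_nil]
      set d := ws.foldl (pvA wl) (PySem.Dict.empty : PySem.Dict String Int) with hd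
      set seen := ws.foldl (pvS wl) [] with hseen
      have hcont : d.contains w = decide (w ∈ seen) := by
        show d.items.any (fun p => p.1 == w) = _
        rw [ih]; exact pvAny_map_key seen _ w
      by_cases hw : w ∈ wl
      · by_cases hs : w ∈ seen
        · -- increment branch
          have hc : d.contains w = true := by rw [hcont]; simpa using hs
          have hget : d.getD w 0 = (ws.count w : Int) := by
            simp only [PySem.Dict.getD, PySem.Dict.get?, ih, List.find?_map]
            rw [show ((fun p => p.1 == w) ∘ fun u => (u, (ws.count u : Int)))
                  = (fun u => u == w) from rfl, pvFind_self seen w hs]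
            rfl
          rw [show pvA wl d w = d.modify w 0 (· + 1) by simp [pvA, hc, hw]]
          rw [show d.modify w 0 (· + 1) = d.insert w (d.getD w 0 + 1) by
            simp [PySem.Dict.modify]]
          rw [PySem.Dict.items_insert_of_contains _ _ hc, ih]
          rw [show pvS wl seen w = seen by simp [pvS, hs]]
          rw [List.map_map]
          apply List.map_congr_left
          intro u _
          by_cases hu : u = w
          · subst hu
            simp only [Function.comp_apply, beq_self_eq_true, if_true, hget,
              List.count_append, List.count_singleton, Prod.mk.injEq, true_and]
            push_cast; ring
          · have hbeq : (u == w) = false := by simp [hu]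
            have hwu : ¬ w = u := fun h => hu h.symm
            simp [Function.comp_apply, hbeq, List.count_append,
              List.count_singleton, hwu, hu]
        · -- new-key branch
          have hc : d.contains w = false := by rw [hcont]; simpa using hs
          have hws : w ∉ ws := fun hmem =>
            hs ((pvMem_seen wl ws [] w).2 (Or.inr ⟨hw, hmem⟩))
          rw [show pvA wl d w = d.insert w 1 by simp [pvA, hc, hw]]
          rw [PySem.Dict.items_insert_of_not_contains _ _ (by simp [hc]), ih]
          rw [show pvS wl seen w = seen ++ [w] by simp [pvS, hs, hw]]
          rw [List.map_append]
          congr 1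
          · apply List.map_congr_left
            intro u hu
            have hbeq : (u == w) = false := by
              simp only [beq_eq_false_iff_ne, ne_eq]
              exact fun h => hs (h ▸ hu)
            have hwu : ¬ w = u := fun h => hs (h ▸ hu)
            have huw : ¬ u = w := fun h => hwu h.symm
            simp [List.count_append, List.count_singleton, hbeq, hwu, huw]
          · have h0 : ws.count w = 0 := List.count_eq_zero.2 hws
            simp [List.count_append, List.count_singleton, h0]
      · -- word not allowed: nothing changes
        rw [show pvA wl d w = d by simp [pvA, hw]]
        rw [show pvS wl seen w = seen by simp [pvS, hw]]
        rw [ih]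
        apply List.map_congr_left
        intro u hu
        have huwl : u ∈ wl :=
          (((pvMem_seen wl ws [] u).1 hu).resolve_left (by simp)).1
        have hbeq : (u == w) = false := by
          simp only [beq_eq_false_iff_ne, ne_eq]
          exact fun h => hw (h ▸ huwl)
        have hwu : ¬ w = u := fun h => hw (h ▸ huwl)
        have huw : ¬ u = w := fun h => hwu h.symm
        simp [List.count_append, List.count_singleton, hbeq, hwu, huw]

-- ===== VERDICT =====
theorem get_word_freq_spec : Claim_equal_get_word_freq := by
  intro word_list sentence _
  unfold Spec_get_word_freq get_word_freq get_word_freq_alt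
  simp only [PySem.List.count_eq]
  exact pvMain word_list _
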